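-- pv_equiv track=rewrite | github.com/vishwaspuriofficial/Coding-Practice | Code Signal/2. The Core/4. Loop Tunnel/30. Apple Boxes.py | solution
-- ===== SOURCE A (Python) =====
-- def solution(k):
--     r = 0
--     y = 0
--
--     for i in range(1, k + 1):
--         if i % 2 == 0:
--             r += i ** 2
--         else:
--             y += i ** 2
--     return r - y
-- ===== SOURCE B (Python) =====
-- def solution(k):
--     if k <= 0:
--         return 0
--     t = k * (k + 1) // 2
--     return t if k % 2 == 0 else -t
-- ===== Notes on version B (the rewrite author's own statement) =====
-- stated objective: faster
-- what changed: Replaces the O(k) loop accumulating even and odd squares with the signed closed form ±k*(k+1)/2 (negative for odd k).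
import Mathlib
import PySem

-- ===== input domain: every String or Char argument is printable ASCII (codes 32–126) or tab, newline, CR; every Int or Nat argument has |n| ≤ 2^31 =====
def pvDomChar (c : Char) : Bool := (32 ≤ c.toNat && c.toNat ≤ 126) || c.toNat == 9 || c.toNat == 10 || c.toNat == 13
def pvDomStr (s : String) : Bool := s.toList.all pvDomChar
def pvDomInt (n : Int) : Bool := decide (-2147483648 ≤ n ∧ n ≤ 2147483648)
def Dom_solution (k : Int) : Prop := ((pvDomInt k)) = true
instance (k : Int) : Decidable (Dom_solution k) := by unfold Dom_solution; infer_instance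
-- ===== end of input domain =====

-- B replaces A's O(k) loop with the signed closed form ±k*(k+1)/2 (O(1)).

-- ===== PORT A =====
def solution (k : Int) : Int :=
  let p := (PySem.List.pyRange 1 (k + 1) 1).foldl
    (fun (s : Int × Int) i =>
      if PySem.Int.mod i 2 = 0 then (s.1 + i ^ 2, s.2) else (s.1, s.2 + i ^ 2))
    (0, 0)
  p.1 - p.2

-- ===== PORT B =====
def solution_alt (k : Int) : Int :=
  if k ≤ 0 then 0
  else
    let t := PySem.Int.floordiv (k * (k + 1)) 2
    if PySem.Int.mod k 2 = 0 then t else -t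

-- ===== PRECONDITION & SPEC =====
def Spec_solution (k : Int) (out : Int) : Prop := out = solution_alt k
instance (k : Int) (out : Int) : Decidable (Spec_solution k out) := by unfold Spec_solution; infer_instance

-- ===== CLAIM (what is proved, stated in full; the proofs are below) =====
def Claim_equal_solution : Prop := ∀ (k : Int), Dom_solution k → Spec_solution k (solution k)

-- ===== LEMMAS AND PROOFS =====

def pvStep (s : Int × Int) (i : Int) : Int × Int :=
  if PySem.Int.mod i 2 = 0 then (s.1 + i ^ 2, s.2) else (s.1, s.2 + i ^ 2)

lemma pvLoop (n : Nat) (s : Int × Int) :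
    ((PySem.List.pyRange 1 ((n : Int) + 1) 1).foldl pvStep s).1
      - ((PySem.List.pyRange 1 ((n : Int) + 1) 1).foldl pvStep s).2
    = s.1 - s.2 + (if (n : Int) % 2 = 0 then ((n : Int) * (n + 1)) / 2
                   else -(((n : Int) * (n + 1)) / 2)) := by
  induction n generalizing s with
  | zero =>
    simp [PySem.List.pyRange]
  | succ m ih =>
    have h : PySem.List.pyRange 1 ((m : Int) + 1 + 1) 1
        = PySem.List.pyRange 1 ((m : Int) + 1) 1 ++ [(m : Int) + 1] := by
      exact PySem.List.pyRange_one_succ_right (by omega)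
    rw [show ((m + 1 : Nat) : Int) = (m : Int) + 1 by push_cast; ring, h, List.foldl_append]
    simp only [List.foldl]
    rcases Int.emod_two_eq_zero_or_one (m : Int) with he | ho
    · -- m even, so m+1 odd
      have hm1 : ((m : Int) + 1) % 2 = 1 := by omega
      have hmod : PySem.Int.mod ((m : Int) + 1) 2 = 1 := by
        rw [PySem.Int.mod_eq_emod_of_pos (by norm_num)]; exact hm1
      simp only [pvStep, hmod]
      norm_num
      have ihs := ih s
      rw [if_pos he] at ihs
      rw [if_neg (by omega : ¬ 2 ∣ (m : Int) + 1)]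
      obtain ⟨q, hq⟩ : ∃ q : Int, (m : Int) = 2 * q := ⟨(m : Int) / 2, by omega⟩
      have e1 : (m : Int) * ((m : Int) + 1) / 2 = q * (2 * q + 1) := by
        rw [hq, show 2 * q * (2 * q + 1) = 2 * (q * (2 * q + 1)) by ring,
          Int.mul_ediv_cancel_left _ (by norm_num)]
      have e2 : ((m : Int) + 1) * ((m : Int) + 1 + 1) / 2 = (2 * q + 1) * (q + 1) := by
        rw [hq, show (2 * q + 1) * (2 * q + 1 + 1) = 2 * ((2 * q + 1) * (q + 1)) by ring,
          Int.mul_ediv_cancel_left _ (by norm_num)]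
      rw [e2]
      rw [e1] at ihs
      have : ((m : Int) + 1) ^ 2 = (2 * q + 1) ^ 2 := by rw [hq]
      rw [this]
      nlinarith [ihs]
    · -- m odd, so m+1 even
      have hm1 : ((m : Int) + 1) % 2 = 0 := by omega
      have hmod : PySem.Int.mod ((m : Int) + 1) 2 = 0 := by
        rw [PySem.Int.mod_eq_emod_of_pos (by norm_num)]; exact hm1
      simp only [pvStep, hmod]
      norm_num
      have ihs := ih s
      rw [if_neg (by omega : ¬ (m : Int) % 2 = 0)] at ihs
      rw [if_pos (by omega : 2 ∣ (m : Int) + 1)]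
      obtain ⟨q, hq⟩ : ∃ q : Int, (m : Int) = 2 * q + 1 := ⟨(m : Int) / 2, by omega⟩
      have e1 : (m : Int) * ((m : Int) + 1) / 2 = (2 * q + 1) * (q + 1) := by
        rw [hq, show (2 * q + 1) * (2 * q + 1 + 1) = 2 * ((2 * q + 1) * (q + 1)) by ring,
          Int.mul_ediv_cancel_left _ (by norm_num)]
      have e2 : ((m : Int) + 1) * ((m : Int) + 1 + 1) / 2 = (q + 1) * (2 * q + 3) := by
        rw [hq, show (2 * q + 1 + 1) * (2 * q + 1 + 1 + 1) = 2 * ((q + 1) * (2 * q + 3)) by ring,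
          Int.mul_ediv_cancel_left _ (by norm_num)]
      rw [e2]
      rw [e1] at ihs
      have : ((m : Int) + 1) ^ 2 = (2 * q + 2) ^ 2 := by rw [hq]; ring
      rw [this]
      nlinarith [ihs]

lemma pvEmptyRange (k : Int) (h : k ≤ 0) : PySem.List.pyRange 1 (k + 1) 1 = [] := by
  have := PySem.List.length_pyRange_one 1 (k + 1)
  have hl : (k + 1 - 1).toNat = 0 := by omega
  apply List.eq_nil_of_length_eq_zero
  rw [this, hl]

-- ===== VERDICT (by name: the statement is the Claim_ definition above) =====
theorem solution_spec : Claim_equal_solution := by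
  intro k _
  unfold Spec_solution solution solution_alt
  by_cases hk : k ≤ 0
  · simp [pvEmptyRange k hk, hk]
  · rw [not_le] at hk
    obtain ⟨n, hn⟩ : ∃ n : Nat, k = (n : Int) := ⟨k.toNat, by omega⟩
    subst hn
    have := pvLoop n (0, 0)
    simp only [if_neg (by omega : ¬ (n : Int) ≤ 0)]
    have hfd : PySem.Int.floordiv ((n : Int) * ((n : Int) + 1)) 2
        = ((n : Int) * ((n : Int) + 1)) / 2 :=
      PySem.Int.floordiv_eq_ediv_of_pos (by norm_num)
    have hmd : PySem.Int.mod (n : Int) 2 = (n : Int) % 2 :=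
      PySem.Int.mod_eq_emod_of_pos (by norm_num)
    show ((PySem.List.pyRange 1 ((n : Int) + 1) 1).foldl
        (fun (s : Int × Int) i =>
          if PySem.Int.mod i 2 = 0 then (s.1 + i ^ 2, s.2) else (s.1, s.2 + i ^ 2))
        (0, 0)).1
      - ((PySem.List.pyRange 1 ((n : Int) + 1) 1).foldl
        (fun (s : Int × Int) i =>
          if PySem.Int.mod i 2 = 0 then (s.1 + i ^ 2, s.2) else (s.1, s.2 + i ^ 2))
        (0, 0)).2 = _
    have hstep : (fun (s : Int × Int) i =>
        if PySem.Int.mod i 2 = 0 then (s.1 + i ^ 2, s.2) else (s.1, s.2 + i ^ 2)) = pvStep := by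
      funext s i; rfl
    rw [hstep, this, hfd, hmd]
    simp
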